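-- pv_equiv track=rewrite | github.com/LoganKloft/aoc2023 | day_2_cube_conundrum/part1.py | getGameSets
-- ===== SOURCE A (Python) =====
-- def getGameSets(line):
--     # sets start at index 8
--     game_set = ""
--     game_sets = []
--
--     start_index = 0
--     while line[start_index] != ":":
--         start_index += 1
--     start_index += 2
--
--     for i in range(start_index, len(line)):
--         if line[i] == ",":
--             continue
--
--         if line[i] == ";":
--             game_sets.append(game_set.strip())
--             game_set = ""
--             i += 1
--             continue
--
--         game_set += line[i]
--
--     game_sets.append(game_set.strip())
--     return game_sets
-- ===== SOURCE B (Python) =====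
-- def getGameSets(line):
--     # keep the colon scan so a colon-free line still raises IndexError like A
--     start_index = 0
--     while line[start_index] != ":":
--         start_index += 1
--     remainder = line[start_index + 2:]
--     return [chunk.replace(",", "").strip() for chunk in remainder.split(";")]
-- ===== Notes on version B (the rewrite author's own statement) =====
-- stated objective: idiomatic
-- what changed: Replaces A's character-by-character scan with per-char branches by slicing the remainder after the colon and mapping replace(',','')+strip() over split(';'); the colon scan is kept so colon-free lines still raise IndexError.
-- outside the precondition, e.g. on getGameSets('no colon here'): A raises IndexError, B raises IndexError
import Mathlib
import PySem

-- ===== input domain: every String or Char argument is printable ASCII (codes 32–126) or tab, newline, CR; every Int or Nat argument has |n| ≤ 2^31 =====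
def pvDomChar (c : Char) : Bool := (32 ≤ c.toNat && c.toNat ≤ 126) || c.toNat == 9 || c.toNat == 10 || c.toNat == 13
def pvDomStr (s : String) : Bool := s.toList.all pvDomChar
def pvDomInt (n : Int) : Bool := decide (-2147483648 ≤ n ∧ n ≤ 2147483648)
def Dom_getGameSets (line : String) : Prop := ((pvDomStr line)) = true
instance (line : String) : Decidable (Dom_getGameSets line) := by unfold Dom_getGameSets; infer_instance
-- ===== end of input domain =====

-- B replaces A's character-by-character scan (per-char branches building each set string) by a
-- slice + split(';') with replace(',','')/strip() per chunk: same return value, idiomatic decomposition.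

-- ===== PORT A =====
-- the 'while line[start_index] != ":"' colon scan of both Pythons (none = IndexError, excluded by Pre_)
def pvFindColon : List Char → Nat → Option Nat
  | [], _ => none
  | c :: cs, i => if c = ':' then some i else pvFindColon cs (i + 1)

-- A's for-loop over range(start_index, len(line)), state (game_set, game_sets)
def pvLoopA : List Char → List Char → List String → List String
  | [], gs, sets => sets ++ [String.ofList (PySem.Chars.strip gs)]
  | c :: rest, gs, sets =>
    if c = ',' then pvLoopA rest gs sets
    else if c = ';' then pvLoopA rest [] (sets ++ [String.ofList (PySem.Chars.strip gs)])
    else pvLoopA rest (gs ++ [c]) sets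

def getGameSets (line : String) : List String :=
  match pvFindColon line.toList 0 with
  | none => []  -- Python raises IndexError here; outside Pre_
  | some k => pvLoopA (line.toList.drop (k + 2)) [] []  -- indices k+2..len-1 are exactly this suffix

-- ===== PORT B =====
-- chunk.replace(",", "").strip(): one-char old and empty new, so replace is exactly a filter
def pvChunk (c : List Char) : String :=
  String.ofList (PySem.Chars.strip (c.filter (· != ',')))

def getGameSets_alt (line : String) : List String :=
  match pvFindColon line.toList 0 with
  | none => []  -- Python raises IndexError here; outside Pre_
  | some k =>
      -- remainder = line[start_index + 2:]; remainder.split(";") is splitOn on a one-char sep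
      ((line.toList.drop (k + 2)).splitOn ';').map pvChunk

-- ===== PRECONDITION & SPEC =====
-- Pre_ excludes exactly the lines without a colon, on which both Pythons raise IndexError.
def Pre_getGameSets (line : String) : Prop := ':' ∈ line.toList
instance (line : String) : Decidable (Pre_getGameSets line) := by unfold Pre_getGameSets; infer_instance

def pvWitness_getGameSets : String := "Game 1: 3 red, 4 blue; 2 green"

def Spec_getGameSets (line : String) (out : List String) : Prop := out = getGameSets_alt line
instance (line : String) (out : List String) : Decidable (Spec_getGameSets line out) := by unfold Spec_getGameSets; infer_instance

-- ===== CLAIM (what is proved, stated in full; the proofs are below) =====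
def Claim_equal_getGameSets : Prop := ∀ (line : String), Dom_getGameSets line → Pre_getGameSets line → Spec_getGameSets line (getGameSets line)

-- ===== LEMMAS AND PROOFS =====

-- A's scan equals: first chunk of splitOnP(';'), prefixed by the pending game_set, commas filtered,
-- stripped; remaining chunks via pvChunk; all appended to the sets emitted so far.
lemma pvLoopA_spec (cs : List Char) : ∀ (gs : List Char) (sets : List String),
    pvLoopA cs gs sets = sets ++
      (String.ofList (PySem.Chars.strip (gs ++ ((List.splitOnP (· == ';') cs).headI.filter (· != ',')))) ::
       ((List.splitOnP (· == ';') cs).tail.map pvChunk)) := by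
  induction cs with
  | nil => intro gs sets; simp [pvLoopA, List.splitOnP_nil]
  | cons c rest ih =>
    intro gs sets
    obtain ⟨h, t, hht⟩ := List.exists_cons_of_ne_nil (List.splitOnP_ne_nil (· == ';') rest)
    by_cases hsemi : c = ';'
    · subst hsemi
      rw [List.splitOnP_cons]
      simp only [BEq.rfl, if_pos]
      rw [pvLoopA, if_neg (by decide), if_pos rfl, ih, hht]
      simp [pvChunk]
    · rw [List.splitOnP_cons, if_neg (by simpa using hsemi), hht]
      by_cases hcomma : c = ','
      · subst hcomma
        rw [pvLoopA, if_pos rfl, ih, hht]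
        simp
      · rw [pvLoopA, if_neg hcomma, if_neg hsemi, ih (gs ++ [c]), hht]
        simp [hcomma, List.append_assoc]

-- ===== VERDICT (by name: the statement is the Claim_ definition above) =====
theorem getGameSets_spec : Claim_equal_getGameSets := by
  intro line _ _
  unfold Spec_getGameSets getGameSets getGameSets_alt
  cases hfc : pvFindColon line.toList 0 with
  | none => simp
  | some k =>
    simp only []
    obtain ⟨h, t, hht⟩ :=
      List.exists_cons_of_ne_nil (List.splitOnP_ne_nil (· == ';') (line.toList.drop (k + 2)))
    show pvLoopA (line.toList.drop (k + 2)) [] [] = ((line.toList.drop (k + 2)).splitOn ';').map pvChunk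
    rw [pvLoopA_spec, List.splitOn, hht]
    simp [pvChunk]
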